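-- pv_equiv track=rewrite | github.com/asarinn/house-party-POS | main_window/main_window.py | get_new_patron_grid_cell
-- ===== SOURCE A (Python) =====
-- DEFAULT_SPIRAL_SHELLS = 7
--
-- def get_new_patron_grid_cell(num_patrons: int) -> (int, int):
--     direction_names = ['right', 'down', 'left', 'up']
--     directions = [(1, 0), (0, 1), (-1, 0), (0, -1)]
--     final_direction = (0, 0)
--
--     direction = 0
--     side_length = 1
--     side_position = 0
--     turns_this_length = 0
--
--     for i in range(num_patrons):
--         next_direction = directions[direction]
--         final_direction = tuple(map(sum, zip(final_direction, next_direction)))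
--
--         side_position += 1
--         if side_position == side_length:
--             direction += 1
--             turns_this_length += 1
--             side_position = 0
--
--         if turns_this_length == 2:
--             side_length += 1
--             turns_this_length = 0
--
--         if direction == 4:
--             direction = 0
--
--     return final_direction[0] + DEFAULT_SPIRAL_SHELLS, final_direction[1] + DEFAULT_SPIRAL_SHELLS
-- ===== SOURCE B (Python) =====
-- DEFAULT_SPIRAL_SHELLS = 7
--
--
-- def get_new_patron_grid_cell(num_patrons: int) -> (int, int):
--     # Walk the spiral side by side instead of step by step: consume whole
--     # sides (lengths 1,1,2,2,3,3,...) until fewer than one side remains.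
--     if num_patrons <= 0:
--         return DEFAULT_SPIRAL_SHELLS, DEFAULT_SPIRAL_SHELLS
--     x = y = 0
--     dx, dy = 1, 0
--     length = 1
--     grow = False
--     remaining = num_patrons
--     while remaining > length:
--         remaining -= length
--         x += length * dx
--         y += length * dy
--         dx, dy = -dy, dx
--         if grow:
--             length += 1
--         grow = not grow
--     return x + remaining * dx + DEFAULT_SPIRAL_SHELLS, y + remaining * dy + DEFAULT_SPIRAL_SHELLS
-- ===== Notes on version B (the rewrite author's own statement) =====
-- stated objective: faster
-- what changed: B walks the spiral a whole side (lengths 1,1,2,2,3,3,...) at a time, rotating the direction vector and jumping length*direction per iteration, instead of A's one-cell-per-patron simulation, so it takes O(sqrt(n)) loop iterations instead of O(n).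
import Mathlib
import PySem

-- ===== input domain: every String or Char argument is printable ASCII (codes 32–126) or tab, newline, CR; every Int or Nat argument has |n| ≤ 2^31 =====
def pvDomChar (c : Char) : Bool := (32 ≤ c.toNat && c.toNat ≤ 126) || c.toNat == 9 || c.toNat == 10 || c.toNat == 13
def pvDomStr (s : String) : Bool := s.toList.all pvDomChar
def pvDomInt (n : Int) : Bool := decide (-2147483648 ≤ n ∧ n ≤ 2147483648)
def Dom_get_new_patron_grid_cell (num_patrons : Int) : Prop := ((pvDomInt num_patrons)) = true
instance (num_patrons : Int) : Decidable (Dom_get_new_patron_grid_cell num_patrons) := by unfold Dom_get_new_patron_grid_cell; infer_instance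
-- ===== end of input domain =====

-- B replaces A's one-cell-per-patron spiral walk by a side-at-a-time walk (fewer loop iterations).

-- ===== PORT A =====
-- loop state: (final_direction, direction, side_length, side_position, turns_this_length);
-- the loop index i is unused by the body, so the step takes it as `_i`.
def pvAStep (s : (Int × Int) × Int × Int × Int × Int) (_i : Int) :
    (Int × Int) × Int × Int × Int × Int :=
  let directions : List (Int × Int) := [(1, 0), (0, 1), (-1, 0), (0, -1)]
  let (final_direction, direction, side_length, side_position, turns_this_length) := s
  -- `direction` is always 0..3 at the top of the loop, so the `.getD` default is never used
  let next_direction := (PySem.List.pyGet? directions direction).getD (0, 0)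
  -- tuple(map(sum, zip(a, b))) on pairs = componentwise addition
  let final_direction := (final_direction.1 + next_direction.1, final_direction.2 + next_direction.2)
  let side_position := side_position + 1
  let (direction, turns_this_length, side_position) :=
    if side_position = side_length then (direction + 1, turns_this_length + 1, (0 : Int))
    else (direction, turns_this_length, side_position)
  let (side_length, turns_this_length) :=
    if turns_this_length = 2 then (side_length + 1, (0 : Int)) else (side_length, turns_this_length)
  let direction := if direction = 4 then 0 else direction
  (final_direction, direction, side_length, side_position, turns_this_length)

def get_new_patron_grid_cell (num_patrons : Int) : List Int :=
  let st := (PySem.List.pyRange 0 num_patrons 1).foldl pvAStep ((0, 0), 0, 1, 0, 0)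
  [st.1.1 + 7, st.1.2 + 7]

-- ===== PORT B =====
-- the while-loop of Source B; it terminates because `remaining` strictly decreases
-- (0 < length is an invariant, threaded as the proof argument hl)
def pvBLoop (remaining x y dx dy length : Int) (grow : Bool) (hl : 0 < length) : Int × Int :=
  if h : remaining > length then
    pvBLoop (remaining - length) (x + length * dx) (y + length * dy) (-dy) dx
      (if grow then length + 1 else length) (!grow)
      (by split <;> omega)
  else
    (x + remaining * dx, y + remaining * dy)
termination_by remaining.toNat
decreasing_by omega

def get_new_patron_grid_cell_alt (num_patrons : Int) : List Int :=
  if num_patrons ≤ 0 then [7, 7]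
  else
    let p := pvBLoop num_patrons 0 0 1 0 1 false (by norm_num)
    [p.1 + 7, p.2 + 7]

-- ===== PRECONDITION & SPEC =====
def Spec_get_new_patron_grid_cell (num_patrons : Int) (out : List Int) : Prop := out = get_new_patron_grid_cell_alt num_patrons
instance (num_patrons : Int) (out : List Int) : Decidable (Spec_get_new_patron_grid_cell num_patrons out) := by unfold Spec_get_new_patron_grid_cell; infer_instance

-- ===== CLAIM (what is proved, stated in full; the proofs are below) =====
def Claim_equal_get_new_patron_grid_cell : Prop := ∀ (num_patrons : Int), Dom_get_new_patron_grid_cell num_patrons → Spec_get_new_patron_grid_cell num_patrons (get_new_patron_grid_cell num_patrons)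

-- ===== LEMMAS AND PROOFS =====

-- direction vector of the j-th spiral side, its length, total steps before side j,
-- and the start point of side j
def pvDvec (j : Nat) : Int × Int :=
  if j % 4 = 0 then (1, 0) else if j % 4 = 1 then (0, 1) else if j % 4 = 2 then (-1, 0) else (0, -1)

def pvSlen (j : Nat) : Nat := j / 2 + 1

def pvTsum : Nat → Nat
  | 0 => 0
  | j + 1 => pvTsum j + pvSlen j

def pvEpos : Nat → Int × Int
  | 0 => (0, 0)
  | j + 1 => ((pvEpos j).1 + (pvSlen j : Int) * (pvDvec j).1,
              (pvEpos j).2 + (pvSlen j : Int) * (pvDvec j).2)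

-- A's loop state after pvTsum j + r steps (0 ≤ r < pvSlen j)
def pvStateOf (j r : Nat) : (Int × Int) × Int × Int × Int × Int :=
  (((pvEpos j).1 + (r : Int) * (pvDvec j).1, (pvEpos j).2 + (r : Int) * (pvDvec j).2),
   ((j % 4 : Nat) : Int), ((pvSlen j : Nat) : Int), (r : Int), ((j % 2 : Nat) : Int))

def pvG (s : (Int × Int) × Int × Int × Int × Int) : (Int × Int) × Int × Int × Int × Int :=
  pvAStep s 0

lemma pvAStep_const (s : (Int × Int) × Int × Int × Int × Int) (i : Int) :
    pvAStep s i = pvG s := rfl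

lemma pvDvec_succ (j : Nat) : pvDvec (j + 1) = (-(pvDvec j).2, (pvDvec j).1) := by
  have h : j % 4 = 0 ∨ j % 4 = 1 ∨ j % 4 = 2 ∨ j % 4 = 3 := by omega
  have h' : (j + 1) % 4 = (j % 4 + 1) % 4 := by omega
  rcases h with h | h | h | h <;> simp [pvDvec, h, h']

lemma pvStep_state (j r : Nat) (hr : r < pvSlen j) :
    pvG (pvStateOf j r) = if r + 1 = pvSlen j then pvStateOf (j + 1) 0 else pvStateOf j (r + 1) := by
  have h4 : j % 4 = 0 ∨ j % 4 = 1 ∨ j % 4 = 2 ∨ j % 4 = 3 := by omega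
  have h2 : j % 2 = j % 4 % 2 := by omega
  have hE : pvEpos (j + 1) = ((pvEpos j).1 + (pvSlen j : Int) * (pvDvec j).1,
              (pvEpos j).2 + (pvSlen j : Int) * (pvDvec j).2) := rfl
  by_cases hc : r + 1 = pvSlen j
  · have hcast : ((r : Int) + 1 = ((pvSlen j : Nat) : Int)) := by exact_mod_cast hc
    have hs' : pvSlen (j + 1) = if j % 2 = 1 then pvSlen j + 1 else pvSlen j := by
      unfold pvSlen; split <;> omega
    rcases h4 with h | h | h | h <;>
    · have h4' : (j + 1) % 4 = (j % 4 + 1) % 4 := by omega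
      have h2' : (j + 1) % 2 = (j % 2 + 1) % 2 := by omega
      simp [pvG, pvAStep, pvStateOf, hE, hs', h4', h2', h2, h, hc, hcast, pvDvec]
      try simp [Prod.ext_iff]
      try omega
  · have hcast : ¬ ((r : Int) + 1 = ((pvSlen j : Nat) : Int)) := by
      exact fun hx => hc (by exact_mod_cast hx)
    have hj2 : ¬ ((j : Int) % 2 = 2) := by omega
    rcases h4 with h | h | h | h <;>
    · simp [pvG, pvAStep, pvStateOf, h, hc, hcast, hj2, pvDvec]
      try simp [Prod.ext_iff]
      try omega

lemma pvFoldl_const (l : List Int) (s : (Int × Int) × Int × Int × Int × Int) :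
    l.foldl pvAStep s = pvG^[l.length] s := by
  induction l generalizing s with
  | nil => rfl
  | cons a l ih => simpa [pvAStep_const, Function.iterate_succ_apply] using ih (pvG s)

lemma pvIter_state : ∀ (N j r : Nat), r < pvSlen j → pvTsum j + r = N →
    pvG^[N] ((0, 0), 0, 1, 0, 0) = pvStateOf j r := by
  intro N
  induction N with
  | zero =>
    intro j r hr hN
    have hj : j = 0 := by
      by_contra hj
      obtain ⟨j', rfl⟩ : ∃ j'', j = j'' + 1 := ⟨j - 1, by omega⟩
      have e1 : pvTsum (j' + 1) = pvTsum j' + pvSlen j' := rfl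
      have e2 : pvSlen j' = j' / 2 + 1 := rfl
      omega
    subst hj
    have hr0 : r = 0 := by
      have e2 : pvTsum 0 = 0 := rfl
      omega
    subst hr0
    simp [pvStateOf, pvEpos, pvSlen, pvDvec]
  | succ N ih =>
    intro j r hr hN
    rcases Nat.eq_zero_or_pos r with hr0 | hrpos
    · subst hr0
      have hj : j ≠ 0 := by
        rintro rfl
        have e2 : pvTsum 0 = 0 := rfl
        omega
      obtain ⟨j', rfl⟩ : ∃ j'', j = j'' + 1 := ⟨j - 1, by omega⟩
      have e1 : pvTsum (j' + 1) = pvTsum j' + pvSlen j' := rfl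
      have e2 : pvSlen j' = j' / 2 + 1 := rfl
      have hT : pvTsum j' + (pvSlen j' - 1) = N := by omega
      have hlt : pvSlen j' - 1 < pvSlen j' := by omega
      rw [Function.iterate_succ_apply', ih j' _ hlt hT, pvStep_state j' _ hlt]
      have h1 : pvSlen j' - 1 + 1 = pvSlen j' := by omega
      simp [h1]
    · have hT : pvTsum j + (r - 1) = N := by omega
      have hlt : r - 1 < pvSlen j := by omega
      rw [Function.iterate_succ_apply', ih j _ hlt hT, pvStep_state j _ hlt]
      have h1 : r - 1 + 1 = r := by omega
      rw [h1]
      have hne : ¬ r = pvSlen j := by omega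
      simp [hne]

def pvF (m : Nat) : Int × Int := (pvG^[m] ((0, 0), 0, 1, 0, 0)).1

lemma pvF_decomp (j r : Nat) (hr : r ≤ pvSlen j) :
    pvF (pvTsum j + r) = ((pvEpos j).1 + (r : Int) * (pvDvec j).1,
                          (pvEpos j).2 + (r : Int) * (pvDvec j).2) := by
  rcases Nat.lt_or_ge r (pvSlen j) with h | h
  · rw [pvF, pvIter_state _ j r h rfl, pvStateOf]
  · have hr' : r = pvSlen j := by omega
    subst hr'
    have hT : pvTsum j + pvSlen j = pvTsum (j + 1) + 0 := rfl
    rw [pvF, hT, pvIter_state _ (j + 1) 0 (Nat.succ_pos _) rfl, pvStateOf]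
    simp [pvEpos]

lemma pvBLoop_eq : ∀ (remN : Nat), 0 < remN → ∀ (j : Nat) (x y : Int)
    (hl : (0 : Int) < ((pvSlen j : Nat) : Int)),
    pvBLoop (remN : Int) x y (pvDvec j).1 (pvDvec j).2 ((pvSlen j : Nat) : Int)
        (decide (j % 2 = 1)) hl =
      (x + (pvF (pvTsum j + remN)).1 - (pvEpos j).1,
       y + (pvF (pvTsum j + remN)).2 - (pvEpos j).2) := by
  intro remN
  induction remN using Nat.strong_induction_on with
  | _ remN ih =>
    intro h0 j x y hl
    rw [pvBLoop]
    by_cases hgt : ((remN : Int) > ((pvSlen j : Nat) : Int))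
    · rw [dif_pos hgt]
      have hlt : pvSlen j < remN := by exact_mod_cast hgt
      have hsub : (remN : Int) - ((pvSlen j : Nat) : Int) = ((remN - pvSlen j : Nat) : Int) := by
        omega
      have hd1 : -(pvDvec j).2 = (pvDvec (j + 1)).1 := by rw [pvDvec_succ]
      have hd2 : (pvDvec j).1 = (pvDvec (j + 1)).2 := by rw [pvDvec_succ]
      have hlen : (if decide (j % 2 = 1) then ((pvSlen j : Nat) : Int) + 1
                   else ((pvSlen j : Nat) : Int)) = ((pvSlen (j + 1) : Nat) : Int) := by
        by_cases hp : j % 2 = 1 <;> simp [hp, pvSlen] <;> [skip ; push_cast] <;> omega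
      have hgrow : (!decide (j % 2 = 1)) = decide ((j + 1) % 2 = 1) := by
        by_cases hp : j % 2 = 1
        · have hp' : (j + 1) % 2 = 0 := by omega
          simp [hp, hp']
        · have hp' : (j + 1) % 2 = 1 := by omega
          simp [hp, hp']
      have harg : pvTsum (j + 1) + (remN - pvSlen j) = pvTsum j + remN := by
        have e : pvTsum (j + 1) = pvTsum j + pvSlen j := rfl
        omega
      have hIH := ih (remN - pvSlen j) (by omega) (by omega) (j + 1)
        (x + ((pvSlen j : Nat) : Int) * (pvDvec j).1)
        (y + ((pvSlen j : Nat) : Int) * (pvDvec j).2)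
        (by exact_mod_cast Nat.succ_pos _)
      rw [harg] at hIH
      rw [hd2] at hIH
      simp only [hsub, hlen, hgrow, hd1, hd2]
      rw [hIH]
      have hE : pvEpos (j + 1) = ((pvEpos j).1 + (pvSlen j : Int) * (pvDvec j).1,
                  (pvEpos j).2 + (pvSlen j : Int) * (pvDvec j).2) := rfl
      rw [hE]
      refine Prod.ext ?_ ?_ <;> simp only [← hd2] <;> ring
    · rw [dif_neg hgt]
      have hle : remN ≤ pvSlen j := by
        have : ¬ (pvSlen j < remN) := fun hx => hgt (by exact_mod_cast hx)
        omega
      rw [pvF_decomp j remN hle]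
      refine Prod.ext ?_ ?_ <;> simp <;> ring

-- ===== VERDICT (by name: the statement is the Claim_ definition above) =====
theorem get_new_patron_grid_cell_spec : Claim_equal_get_new_patron_grid_cell := by
  intro n _
  unfold Spec_get_new_patron_grid_cell get_new_patron_grid_cell get_new_patron_grid_cell_alt
  by_cases hn : n ≤ 0
  · rw [PySem.List.pyRange_one_eq_nil hn]
    simp [hn]
  · have hn' : 0 < n := lt_of_not_ge hn
    obtain ⟨m, rfl⟩ : ∃ m : Nat, n = (m : Int) := ⟨n.toNat, (Int.toNat_of_nonneg hn'.le).symm⟩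
    have hm : 0 < m := by exact_mod_cast hn'
    rw [if_neg hn, pvFoldl_const, PySem.List.length_pyRange_one]
    have hlen : ((m : Int) - 0).toNat = m := by omega
    rw [hlen]
    have hb := pvBLoop_eq m hm 0 0 0 (by exact_mod_cast Nat.succ_pos 0)
    have e4 : pvTsum 0 + m = m := by
      have e : pvTsum 0 = 0 := rfl
      omega
    rw [e4] at hb
    simp only [pvDvec, pvSlen, pvEpos] at hb
    norm_num at hb
    rw [hb]
    simp [pvF]
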